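-- pv_equiv track=rewrite | github.com/FNA2003/grupo1-tp1-v1 | lexer/AFDs.py | afd_coma
-- ===== SOURCE A (Python) =====
-- def afd_coma(cadena):
--     """El estado aceptado es 1"""
--     estados_sin_trampa = [0, 1]
--     estados_aceptados = [1]
--     estados_no_aceptados = [0]
--     estado_trampa = 't'
--     estado = 0
--     caracteres = [',']
--     delta = {
--     0: {',': 1},
--     1: {',': 't'},
--     't': {',': 't'}
--     }
--
--     for caracter in cadena:
--         if (estado in estados_sin_trampa) and (caracter in caracteres):
--             estado = delta[estado][caracter]
--         elif (estado == 't') or not(caracter in caracteres):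
--             estado = 't'
--             break
--
--     if estado in estados_aceptados:
--         estado_final = 'aceptado'
--     elif estado in estados_no_aceptados:
--         estado_final = 'no aceptado'
--     elif estado == estado_trampa:
--         estado_final = 'trampa'
--
--     return estado_final
-- ===== SOURCE B (Python) =====
-- def afd_coma(cadena):
--     it = iter(cadena)
--     first = next(it, None)
--     if first is None:
--         return 'no aceptado'
--     if first != ',':
--         return 'trampa'
--     return 'aceptado' if next(it, None) is None else 'trampa'
-- ===== Notes on version B (the rewrite author's own statement) =====
-- stated objective: simpler
-- what changed: Replaces the DFA table simulation (states, delta dict, accept sets) with a direct iterator-based decision that inspects at most the first two characters.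
import Mathlib
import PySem

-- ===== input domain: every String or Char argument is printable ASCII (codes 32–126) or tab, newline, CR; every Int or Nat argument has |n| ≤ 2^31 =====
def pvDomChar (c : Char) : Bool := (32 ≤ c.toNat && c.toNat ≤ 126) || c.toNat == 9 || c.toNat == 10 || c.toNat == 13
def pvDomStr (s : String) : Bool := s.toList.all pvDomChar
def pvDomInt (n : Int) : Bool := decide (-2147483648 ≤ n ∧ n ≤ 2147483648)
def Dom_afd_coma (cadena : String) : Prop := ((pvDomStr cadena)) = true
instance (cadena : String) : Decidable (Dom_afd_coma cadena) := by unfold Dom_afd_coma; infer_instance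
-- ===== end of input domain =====

-- B replaces the DFA table simulation with a direct decision on the first two characters (simpler).


-- ===== PORT A =====
-- states 0, 1, 't' of A's DFA
inductive AfdSt where
  | s0 | s1 | st
deriving DecidableEq, Repr

-- delta: only the entries the loop can reach with caracter = ','
def afdDelta : AfdSt → AfdSt
  | .s0 => .s1
  | .s1 => .st
  | .st => .st

-- the 'for caracter in cadena' loop, with 'break' as early return of the state
def afdLoop : List Char → AfdSt → AfdSt
  | [], estado => estado
  | c :: cs, estado =>
    if (estado = .s0 ∨ estado = .s1) ∧ c = ',' then
      afdLoop cs (afdDelta estado)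
    else if estado = .st ∨ ¬ (c = ',') then
      AfdSt.st
    else
      afdLoop cs estado

def afd_coma (cadena : String) : String :=
  let estado := afdLoop cadena.toList AfdSt.s0
  if estado = .s1 then "aceptado"
  else if estado = .s0 then "no aceptado"
  else "trampa"

-- ===== PORT B =====
def afd_coma_alt (cadena : String) : String :=
  match cadena.toList with
  | [] => "no aceptado"
  | first :: rest =>
    if first ≠ ',' then "trampa"
    else match rest with
      | [] => "aceptado"
      | _ :: _ => "trampa"

-- ===== PRECONDITION & SPEC =====
def Spec_afd_coma (cadena : String) (out : String) : Prop := out = afd_coma_alt cadena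
instance (cadena : String) (out : String) : Decidable (Spec_afd_coma cadena out) := by unfold Spec_afd_coma; infer_instance

-- ===== CLAIM (what is proved, stated in full; the proofs are below) =====
def Claim_equal_afd_coma : Prop := ∀ (cadena : String), Dom_afd_coma cadena → Spec_afd_coma cadena (afd_coma cadena)

-- ===== LEMMAS AND PROOFS =====
theorem afdLoop_st (cs : List Char) : afdLoop cs AfdSt.st = AfdSt.st := by
  cases cs with
  | nil => rfl
  | cons c cs => simp [afdLoop]

-- ===== VERDICT (by name: the statement is the Claim_ definition above) =====
theorem afd_coma_spec : Claim_equal_afd_coma := by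
  intro cadena _
  unfold Spec_afd_coma afd_coma afd_coma_alt
  cases hl : cadena.toList with
  | nil => rfl
  | cons c cs =>
    by_cases hc : c = ','
    · cases cs with
      | nil => simp [afdLoop, hc, afdDelta]
      | cons d ds => by_cases hd : d = ',' <;> simp [afdLoop, hc, hd, afdDelta, afdLoop_st]
    · simp [afdLoop, hc]
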